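-- pv_equiv track=rewrite | github.com/avaughn271/AdmixtureBayes | admixturebayes/tree_operations.py | get_index_of_nonroot_branches
-- ===== SOURCE A (Python) =====
-- def get_index_of_nonroot_branches(tree):
--     res=[-1,-1]
--     count=0
--     for n,branch in enumerate(tree):
--         if branch[0]!="r":
--             res[count]=n
--             count+=1
--             if count==2:
--                 break
--     return [n for n in range(len(tree)) if n not in res]
-- ===== SOURCE B (Python) =====
-- def get_index_of_nonroot_branches(tree):
--     result = []
--     skipped = 0
--     for n, branch in enumerate(tree):
--         if skipped < 2 and branch[0] != "r":
--             skipped += 1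
--         else:
--             result.append(n)
--     return result
-- ===== Notes on version B (the rewrite author's own statement) =====
-- stated objective: simpler
-- what changed: B builds the answer directly in one enumerate pass with a skip counter, instead of A's find-then-filter shape that records two indices into a [-1,-1] sentinel list and then filters range(len(tree)) by membership.
import Mathlib
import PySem

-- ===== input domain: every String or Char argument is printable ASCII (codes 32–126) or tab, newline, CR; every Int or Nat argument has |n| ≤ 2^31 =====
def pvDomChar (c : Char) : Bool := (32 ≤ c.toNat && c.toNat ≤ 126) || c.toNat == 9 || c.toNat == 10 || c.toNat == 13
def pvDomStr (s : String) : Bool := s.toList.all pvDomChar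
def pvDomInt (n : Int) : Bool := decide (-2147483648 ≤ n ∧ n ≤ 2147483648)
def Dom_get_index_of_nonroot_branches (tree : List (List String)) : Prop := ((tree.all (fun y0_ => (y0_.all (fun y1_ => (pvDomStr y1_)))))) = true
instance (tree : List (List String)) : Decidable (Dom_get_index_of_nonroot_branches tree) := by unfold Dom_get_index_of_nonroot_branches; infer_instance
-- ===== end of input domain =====

-- B replaces A's find-two-indices-then-filter-range shape by a single enumerate pass
-- with a skip counter that builds the result directly (objective: simpler).

-- ===== PORT A =====
-- the 'for n,branch in enumerate(tree)' loop of A: state res (length 2), count; break = return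
def goA : List (List String) → Int → List Int → Nat → List Int
  | [], _, res, _ => res
  | branch :: rest, n, res, count =>
      match PySem.List.pyGet? branch 0 with
      | none => res        -- Python raises IndexError here (excluded by Pre_)
      | some h =>
        if h ≠ "r" then
          let res' := res.set count n
          if count + 1 = 2 then res' else goA rest (n + 1) res' (count + 1)
        else goA rest (n + 1) res count

def get_index_of_nonroot_branches (tree : List (List String)) : List Int :=
  let res := goA tree 0 [-1, -1] 0
  (PySem.List.pyRange 0 (tree.length : Int) 1).filter (fun n => !(res.contains n))

-- ===== PORT B =====
-- B's single pass: skipped counter, result accumulator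
def goB : List (List String) → Int → Nat → List Int → List Int
  | [], _, _, result => result
  | branch :: rest, n, skipped, result =>
      if skipped < 2 then
        match PySem.List.pyGet? branch 0 with
        | none => result   -- Python raises IndexError here (excluded by Pre_)
        | some h =>
          if h ≠ "r" then goB rest (n + 1) (skipped + 1) result
          else goB rest (n + 1) skipped (result ++ [n])
      else goB rest (n + 1) skipped (result ++ [n])

def get_index_of_nonroot_branches_alt (tree : List (List String)) : List Int :=
  goB tree 0 0 []

-- ===== PRECONDITION & SPEC =====
-- Pre_ excludes exactly the inputs where A (and B) raise IndexError: an empty branch reached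
-- by the scan, i.e. one preceded by fewer than two non-root branches.
def Pre_get_index_of_nonroot_branches (tree : List (List String)) : Prop :=
  ∀ i, i < tree.length → tree[i]? = some [] →
    2 ≤ (tree.take i).countP (fun br => decide (br.head? ≠ some "r"))
instance (tree : List (List String)) : Decidable (Pre_get_index_of_nonroot_branches tree) := by unfold Pre_get_index_of_nonroot_branches; infer_instance

def pvWitness_get_index_of_nonroot_branches : List (List String) := [["r"], ["a"], ["b"], ["c"]]

def Spec_get_index_of_nonroot_branches (tree : List (List String)) (out : List Int) : Prop := out = get_index_of_nonroot_branches_alt tree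
instance (tree : List (List String)) (out : List Int) : Decidable (Spec_get_index_of_nonroot_branches tree out) := by unfold Spec_get_index_of_nonroot_branches; infer_instance

-- ===== CLAIM (what is proved, stated in full; the proofs are below) =====
def Claim_equal_get_index_of_nonroot_branches : Prop := ∀ (tree : List (List String)), Dom_get_index_of_nonroot_branches tree → Pre_get_index_of_nonroot_branches tree → Spec_get_index_of_nonroot_branches tree (get_index_of_nonroot_branches tree)

-- ===== LEMMAS AND PROOFS =====

-- scan-safety invariant: starting with counter c, the scan never reads an empty branch
def SafeFrom (c : Nat) (rest : List (List String)) : Prop :=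
  ∀ i, i < rest.length → rest[i]? = some [] →
    2 ≤ c + (rest.take i).countP (fun br => decide (br.head? ≠ some "r"))

lemma pre_safe {tree : List (List String)}
    (h : Pre_get_index_of_nonroot_branches tree) : SafeFrom 0 tree := by
  intro i hi he
  have := h i hi he
  omega

lemma safe_head {c : Nat} {b : List String} {rest : List (List String)}
    (h : SafeFrom c (b :: rest)) (hc : c < 2) : b ≠ [] := by
  intro hb
  have := h 0 (by simp) (by simp [hb])
  simp at this
  omega

lemma safe_tail_any {c : Nat} {b : List String} {rest : List (List String)}
    (h : SafeFrom c (b :: rest)) : SafeFrom (c + 1) rest := by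
  intro i hi he
  have h2 := h (i + 1) (by simp only [List.length_cons]; omega) (by simpa using he)
  rw [List.take_succ_cons, List.countP_cons] at h2
  by_cases hpb : b.head? = some "r"
  · rw [if_neg (by simp [hpb])] at h2; omega
  · rw [if_pos (by simp [hpb])] at h2; omega

lemma safe_tail_root {c : Nat} {b : List String} {rest : List (List String)}
    (hr : b.head? = some "r") (h : SafeFrom c (b :: rest)) : SafeFrom c rest := by
  intro i hi he
  have h2 := h (i + 1) (by simp only [List.length_cons]; omega) (by simpa using he)
  rw [List.take_succ_cons, List.countP_cons, if_neg (by simp [hr])] at h2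
  omega

lemma safe_of_two {c : Nat} (rest : List (List String)) (hc : 2 ≤ c) : SafeFrom c rest := by
  intro i _ _
  omega

-- reference single-pass function = B without the accumulator
def refF : List (List String) → Int → Nat → List Int
  | [], _, _ => []
  | branch :: rest, n, skipped =>
      if skipped < 2 then
        match PySem.List.pyGet? branch 0 with
        | none => []
        | some h =>
          if h ≠ "r" then refF rest (n + 1) (skipped + 1)
          else n :: refF rest (n + 1) skipped
      else n :: refF rest (n + 1) skipped

lemma goB_eq_acc_refF : ∀ (rest : List (List String)) (n : Int) (c : Nat) (acc : List Int),
    SafeFrom c rest → goB rest n c acc = acc ++ refF rest n c := by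
  intro rest
  induction rest with
  | nil => intro n c acc _; simp [goB, refF]
  | cons b rest ih =>
      intro n c acc hsafe
      simp only [goB, refF]
      by_cases hc : c < 2
      · simp only [if_pos hc]
        obtain ⟨x, xs, rfl⟩ := List.exists_cons_of_ne_nil (safe_head hsafe hc)
        rw [PySem.List.pyGet?_zero_cons]
        by_cases hx : x ≠ "r"
        · simp only [if_pos hx]; exact ih _ _ _ (safe_tail_any hsafe)
        · have hroot : (x :: xs).head? = some "r" := by
            simp only [List.head?_cons]
            simpa using hx
          simp only [if_neg hx, ih _ _ _ (safe_tail_root hroot hsafe),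
            List.append_assoc, List.singleton_append]
      · have h2 : 2 ≤ c := by omega
        rw [if_neg hc, ih _ _ _ (safe_of_two rest h2), List.append_assoc, List.singleton_append, if_neg hc]

-- with skipped ≥ 2, refF is just the remaining range
lemma refF_two : ∀ (rest : List (List String)) (n : Int),
    refF rest n 2 = PySem.List.pyRange n (n + rest.length) 1 := by
  intro rest
  induction rest with
  | nil => intro n; simp [refF, PySem.List.pyRange_one_eq_nil]
  | cons b rest ih =>
      intro n
      have h1 : n < n + ((b :: rest).length : Int) := by push_cast [List.length_cons]; omega
      rw [PySem.List.pyRange_one_cons h1,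
        show n + (((b :: rest).length : Nat) : Int) = (n + 1) + (rest.length : Int) by
          push_cast [List.length_cons]; ring]
      simp only [refF]
      rw [if_neg (show ¬ ((2:Nat) < 2) by omega), ih (n + 1)]

-- every element of goA's result is an old entry or ≥ n
lemma elem_goA : ∀ (rest : List (List String)) (n : Int) (res : List Int) (c : Nat) (x : Int),
    x ∈ goA rest n res c → x ∈ res ∨ n ≤ x := by
  intro rest
  induction rest with
  | nil => intro n res c x hx; simp [goA] at hx; exact Or.inl hx
  | cons b rest ih =>
      intro n res c x hx
      simp only [goA] at hx
      cases hg : PySem.List.pyGet? b 0 with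
      | none => rw [hg] at hx; exact Or.inl hx
      | some h =>
          rw [hg] at hx
          by_cases hh : h ≠ "r"
          · simp only [if_pos hh] at hx
            by_cases hc : c + 1 = 2
            · simp only [if_pos hc] at hx
              rcases List.mem_or_eq_of_mem_set hx with h' | h'
              · exact Or.inl h'
              · right; omega
            · simp only [if_neg hc] at hx
              rcases ih (n + 1) _ _ _ hx with h' | h'
              · rcases List.mem_or_eq_of_mem_set h' with h'' | h''
                · exact Or.inl h''
                · right; omega
              · right; omega
          · simp only [if_neg hh] at hx
            rcases ih (n + 1) _ _ _ hx with h' | h'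
            · exact Or.inl h'
            · right; omega

-- goA started in state 1 keeps slot 0
lemma goA_one_head : ∀ (rest : List (List String)) (n a bv : Int),
    ∃ b', goA rest n [a, bv] 1 = [a, b'] := by
  intro rest
  induction rest with
  | nil => intro n a bv; exact ⟨bv, rfl⟩
  | cons b rest ih =>
      intro n a bv
      simp only [goA]
      cases hg : PySem.List.pyGet? b 0 with
      | none => exact ⟨bv, rfl⟩
      | some h =>
          by_cases hh : h ≠ "r"
          · simp only [if_pos hh]
            exact ⟨n, rfl⟩
          · simp only [if_neg hh]
            exact ih (n + 1) a bv

-- filtering a range by non-membership in a two-element list of smaller values keeps everything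
lemma filter_range_small : ∀ (len : Nat) (n a b : Int), a < n → b < n →
    (PySem.List.pyRange n (n + len) 1).filter (fun m => !([a, b].contains m)) = PySem.List.pyRange n (n + len) 1 := by
  intro len
  induction len with
  | zero => intro n a b _ _; simp [PySem.List.pyRange_one_eq_nil]
  | succ k ih =>
      intro n a b ha hb
      have h1 : n < n + ((k : Int) + 1) := by omega
      rw [show ((k + 1 : Nat) : Int) = (k : Int) + 1 by push_cast; ring, PySem.List.pyRange_one_cons h1]
      rw [List.filter_cons]
      have hcontains : ([a, b].contains n) = false := by
        simp only [List.contains_eq_mem, List.mem_cons, decide_eq_false_iff_not]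
        simp only [List.not_mem_nil, or_false]
        omega
      rw [hcontains]
      simp only [Bool.not_false, if_pos]
      rw [show n + ((k : Int) + 1) = (n + 1) + (k : Int) by ring, ih (n + 1) a b (by omega) (by omega)]

-- shape invariant for the main induction
def ResShape (res : List Int) (c : Nat) (n : Int) : Prop :=
  (c = 0 ∧ res = [-1, -1]) ∨ (c = 1 ∧ ∃ a, a < n ∧ res = [a, -1])

lemma main_lemma : ∀ (rest : List (List String)) (n : Int) (res : List Int) (c : Nat),
    SafeFrom c rest → 0 ≤ n → ResShape res c n →
    (PySem.List.pyRange n (n + rest.length) 1).filter (fun m => !((goA rest n res c).contains m))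
      = refF rest n c := by
  intro rest
  induction rest with
  | nil =>
      intro n res c _ _ _
      simp [PySem.List.pyRange_one_eq_nil, refF]
  | cons b rest ih =>
      intro n res c hsafe hn hshape
      have hclt : c < 2 := by rcases hshape with ⟨hc, _⟩ | ⟨hc, _⟩ <;> omega
      obtain ⟨x, xs, rfl⟩ := List.exists_cons_of_ne_nil (safe_head hsafe hclt)
      have hlt : n < n + ((x :: xs) :: rest).length := by push_cast [List.length_cons]; omega
      rw [PySem.List.pyRange_one_cons hlt,
        show n + ((((x :: xs) :: rest).length : Nat) : Int) = (n + 1) + (rest.length : Int) by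
          push_cast [List.length_cons]; ring]
      rw [List.filter_cons]
      simp only [goA, refF, PySem.List.pyGet?_zero_cons]
      rcases hshape with ⟨hc, hres⟩ | ⟨hc, a, ha, hres⟩
      · -- c = 0, res = [-1,-1]
        subst hc; subst hres
        simp only [show ((0:Nat) < 2) = True by simp, if_true]
        by_cases hx : x ≠ "r"
        · -- non-root at n, slot 0 := n, continue in state 1
          simp only [if_pos hx, show ((0:Nat) + 1 = 2) = False by simp, if_false,
            show ([-1, -1] : List Int).set 0 n = [n, -1] from rfl,
            show (0:Nat) + 1 = 1 from rfl]
          obtain ⟨b', hb'⟩ := goA_one_head rest (n + 1) n (-1)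
          have hcont : ((goA rest (n + 1) [n, -1] 1).contains n) = true := by
            rw [hb']; simp
          rw [hcont]
          simp only [Bool.not_true, Bool.false_eq_true, if_false]
          exact ih (n + 1) [n, -1] 1 (safe_tail_any hsafe) (by omega) (Or.inr ⟨rfl, n, by omega, rfl⟩)
        · -- root branch at n: n is kept
          simp only [if_neg hx]
          have hcont : ((goA rest (n + 1) [-1, -1] 0).contains n) = false := by
            simp only [List.contains_eq_mem, decide_eq_false_iff_not]
            intro hmem'
            rcases elem_goA rest (n + 1) [-1, -1] 0 n hmem' with h' | h'
            · simp at h'; omega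
            · omega
          rw [hcont]
          simp only [Bool.not_false, if_true]
          have hroot : ((x :: xs) : List String).head? = some "r" := by
            simp only [List.head?_cons]; simpa using hx
          rw [ih (n + 1) [-1, -1] 0 (safe_tail_root hroot hsafe) (by omega) (Or.inl ⟨rfl, rfl⟩)]
      · -- c = 1, res = [a,-1], a < n
        subst hc; subst hres
        simp only [show ((1:Nat) < 2) = True by simp, if_true]
        by_cases hx : x ≠ "r"
        · -- second non-root: A breaks with res = [a, n]; everything after is kept
          simp only [if_pos hx, show ([a, -1] : List Int).set 1 n = [a, n] from rfl]
          have hcont : (([a, n] : List Int).contains n) = true := by simp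
          rw [hcont]
          simp only [Bool.not_true, Bool.false_eq_true, if_false]
          rw [filter_range_small rest.length (n + 1) a n (by omega) (by omega)]
          rw [refF_two rest (n + 1)]
        · -- root branch at n in state 1: n kept
          simp only [if_neg hx]
          have hcont : ((goA rest (n + 1) [a, -1] 1).contains n) = false := by
            simp only [List.contains_eq_mem, decide_eq_false_iff_not]
            intro hmem'
            rcases elem_goA rest (n + 1) [a, -1] 1 n hmem' with h' | h'
            · simp at h'; rcases h' with h' | h' <;> omega
            · omega
          rw [hcont]
          simp only [Bool.not_false, if_true]
          have hroot : ((x :: xs) : List String).head? = some "r" := by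
            simp only [List.head?_cons]; simpa using hx
          rw [ih (n + 1) [a, -1] 1 (safe_tail_root hroot hsafe) (by omega) (Or.inr ⟨rfl, a, by omega, rfl⟩)]

-- ===== VERDICT (by name: the statement is the Claim_ definition above) =====
theorem get_index_of_nonroot_branches_spec : Claim_equal_get_index_of_nonroot_branches := by
  intro tree _ hpre
  unfold Spec_get_index_of_nonroot_branches
  unfold get_index_of_nonroot_branches get_index_of_nonroot_branches_alt
  rw [goB_eq_acc_refF tree 0 0 [] (pre_safe hpre), List.nil_append]
  have := main_lemma tree 0 [-1, -1] 0 (pre_safe hpre) (by omega) (Or.inl ⟨rfl, rfl⟩)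
  simpa using this
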